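-- pv_equiv track=rewrite | github.com/leetakhotsamit/CS2020 | CS2020/a07/a07q4.py | string_clean
-- ===== SOURCE A (Python) =====
-- def string_clean(s):
--     '''
--     Consues a string (s) and returns a string. The string should be similar
--     to the original string, but for every digit that appears in the string, a
--     number of characters correspoding to the string should be removed fromm
--     the returned string.
--
--     string_clean: Str -> Str
--
--     examples:
--     string_clean("") -> ""
--     string_clean("I love CS116!*!*!?") -> "I love CS?"
--     string_clean("6Hello") -> ""
--     string_clean("I have 0 apples and 39 pears") -> "I have 0 apples and pears"
--     '''
--     string_list = []
--     prev_index = 0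
--     index = 0
--     while index < len(s):
--         if s[index].isdigit() and s[index] != '0':
--             string_list.append(s[prev_index:index])
--             index += int(s[index])
--             prev_index = index
--         elif s[index] == '0':
--             string_list.append(s[prev_index:index + 1])
--             index += 1
--             prev_index = index
--         else:
--             index += 1
--     string_list.append(s[prev_index:index])
--     return ("".join(string_list))
-- ===== SOURCE B (Python) =====
-- def string_clean(s):
--     out = []
--     skip = 0
--     for ch in s:
--         if skip > 0:
--             skip -= 1
--         elif ch.isdigit() and ch != '0':
--             skip = int(ch) - 1
--         else:
--             out.append(ch)
--     return "".join(out)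
-- ===== Notes on version B (the rewrite author's own statement) =====
-- stated objective: idiomatic
-- what changed: Replaced A's while-loop with prev_index/index slice accumulation and index jumps (joining the slices at the end) by a single for-loop over the characters that keeps an integer skip counter and appends kept characters one by one.
import Mathlib
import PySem

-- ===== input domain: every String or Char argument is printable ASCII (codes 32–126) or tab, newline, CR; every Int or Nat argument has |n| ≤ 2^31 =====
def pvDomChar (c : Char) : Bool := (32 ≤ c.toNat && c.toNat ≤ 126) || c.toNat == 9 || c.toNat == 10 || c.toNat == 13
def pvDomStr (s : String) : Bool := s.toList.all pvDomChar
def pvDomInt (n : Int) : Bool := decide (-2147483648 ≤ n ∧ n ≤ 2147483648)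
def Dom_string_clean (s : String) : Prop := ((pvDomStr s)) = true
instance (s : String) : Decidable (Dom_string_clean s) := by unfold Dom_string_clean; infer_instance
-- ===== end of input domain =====

-- B replaces A's prev_index/slice accumulation and index jumps by a single per-character
-- pass with an integer skip counter (objective: simpler/idiomatic).


-- ===== PORT A =====
-- A's while loop: prev_index/index over the char list; each appended slice s[a:b]
-- (0 ≤ a ≤ b) is (cs.drop a).take (b - a), exact for Python's clamping slices;
-- the pieces are joined by concatenating each slice in front of the rest.
-- ch.isdigit() ∧ ch != '0' is written on code points (48..57, ≠ 48), exact on ASCII,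
-- and int(s[index]) for such a digit char is its code point minus 48 (exact: the
-- guard ensures the char is '1'..'9').
def scLoopA (cs : List Char) (prev index : Nat) : List Char :=
  if h : index < cs.length then
    if hd : (48 ≤ cs[index].toNat ∧ cs[index].toNat ≤ 57) ∧ cs[index].toNat ≠ 48 then
      ((cs.drop prev).take (index - prev)) ++
        scLoopA cs (index + (cs[index].toNat - 48)) (index + (cs[index].toNat - 48))
    else if cs[index] = '0' then
      ((cs.drop prev).take (index + 1 - prev)) ++ scLoopA cs (index + 1) (index + 1)
    else
      scLoopA cs prev (index + 1)
  else ((cs.drop prev).take (index - prev))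
termination_by cs.length - index
decreasing_by
  · obtain ⟨⟨h1, h2⟩, h3⟩ := hd
    omega
  · omega
  · omega

def string_clean (s : String) : String := String.ofList (scLoopA s.toList 0 0)

-- ===== PORT B =====
-- B's single for-loop with a skip counter, structural recursion over the chars.
def scLoopB : List Char → Nat → List Char
  | [], _ => []
  | c :: rest, skip =>
      if skip > 0 then scLoopB rest (skip - 1)
      else if (48 ≤ c.toNat ∧ c.toNat ≤ 57) ∧ c.toNat ≠ 48 then
        scLoopB rest (c.toNat - 48 - 1)
      else c :: scLoopB rest skip

def string_clean_alt (s : String) : String := String.ofList (scLoopB s.toList 0)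

-- ===== PRECONDITION & SPEC =====
def Spec_string_clean (s : String) (out : String) : Prop := out = string_clean_alt s
instance (s : String) (out : String) : Decidable (Spec_string_clean s out) := by unfold Spec_string_clean; infer_instance

-- ===== CLAIM (what is proved, stated in full; the proofs are below) =====
def Claim_equal_string_clean : Prop := ∀ (s : String), Dom_string_clean s → Spec_string_clean s (string_clean s)

-- ===== LEMMAS AND PROOFS =====

-- B with a pending skip of k behaves like B restarted after dropping k chars.
theorem scLoopB_skip (xs : List Char) (k : Nat) : scLoopB xs k = scLoopB (xs.drop k) 0 := by
  induction xs generalizing k with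
  | nil => simp [scLoopB]
  | cons c rest ih =>
    cases k with
    | zero => rfl
    | succ k => simp [scLoopB, ih k]

-- one appended character extends the pending slice
theorem take_succ_slice (cs : List Char) (prev index : Nat) (h : index < cs.length)
    (hpi : prev ≤ index) :
    (cs.drop prev).take (index + 1 - prev)
      = (cs.drop prev).take (index - prev) ++ [cs[index]] := by
  have hgE : (cs.drop prev)[index - prev]? = some cs[index] := by
    rw [List.getElem?_drop]
    have : prev + (index - prev) = index := by omega
    rw [this, List.getElem?_eq_getElem h]
  have hs : index + 1 - prev = (index - prev) + 1 := by omega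
  rw [hs, List.take_add_one, hgE]
  simp

-- Main invariant: A's remaining contribution from (prev, index) is the pending
-- slice s[prev:index] followed by B restarted on the chars from index on.
theorem scLoopA_eq (cs : List Char) (prev index : Nat) (hpi : prev ≤ index) :
    scLoopA cs prev index = ((cs.drop prev).take (index - prev)) ++ scLoopB (cs.drop index) 0 := by
  induction prev, index using scLoopA.induct (cs := cs) with
  | case1 prev index h hd ih =>
    rw [scLoopA, dif_pos h, dif_pos hd]
    rw [show List.drop index cs = cs[index] :: List.drop (index + 1) cs from
      List.drop_eq_getElem_cons h]
    rw [scLoopB, if_neg (by omega), if_pos hd,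
      scLoopB_skip (List.drop (index + 1) cs) (cs[index].toNat - 48 - 1), List.drop_drop]
    obtain ⟨⟨h1, h2⟩, h3⟩ := hd
    rw [show index + 1 + (cs[index].toNat - 48 - 1) = index + (cs[index].toNat - 48) by omega]
    rw [ih (le_refl _)]
    simp
  | case2 prev index h hd hz ih =>
    rw [scLoopA, dif_pos h, dif_neg hd, if_pos hz, ih (by omega)]
    rw [show List.drop index cs = cs[index] :: List.drop (index + 1) cs from
      List.drop_eq_getElem_cons h]
    rw [scLoopB, if_neg (by omega), if_neg hd]
    rw [take_succ_slice cs prev index h hpi]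
    simp
  | case3 prev index h hd hz ih =>
    rw [scLoopA, dif_pos h, dif_neg hd, if_neg hz, ih (by omega)]
    rw [show List.drop index cs = cs[index] :: List.drop (index + 1) cs from
      List.drop_eq_getElem_cons h]
    rw [scLoopB, if_neg (by omega), if_neg hd]
    rw [take_succ_slice cs prev index h hpi]
    simp
  | case4 prev index h =>
    rw [scLoopA, dif_neg h]
    rw [List.drop_eq_nil_of_le (by omega : cs.length ≤ index)]
    simp [scLoopB]

-- ===== VERDICT (by name: the statement is the Claim_ definition above) =====
theorem string_clean_spec : Claim_equal_string_clean := by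
  intro s _
  unfold Spec_string_clean string_clean string_clean_alt
  rw [scLoopA_eq s.toList 0 0 (le_refl 0)]
  simp
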